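-- pv_equiv track=rewrite | github.com/weshofmann/tyler-restaurant-csv | find-restaurants.py | prioritize_emails
-- ===== SOURCE A (Python) =====
-- def prioritize_emails(emails, priority_prefixes):
--     """Reorder emails, prioritizing those that start with common prefixes like 'info', 'contact', etc."""
--     prioritized = []
--     others = []
--
--     for email in emails:
--         local_part = email.split('@')[0].lower()  # Get the part before the '@'
--         if any(local_part.startswith(prefix) for prefix in priority_prefixes):
--             prioritized.append(email)
--         else:
--             others.append(email)
--
--     # Return prioritized emails first, followed by others
--     return prioritized + others
-- ===== SOURCE B (Python) =====
-- def prioritize_emails(emails, priority_prefixes):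
--     """Reorder emails, prioritizing those whose local part starts with a priority prefix.
--
--     Single stable sort on a boolean key: matching emails get key False (0), the
--     rest True (1); stability preserves the original relative order in each group.
--     """
--     return sorted(
--         emails,
--         key=lambda e: not any(e.split('@')[0].lower().startswith(p)
--                               for p in priority_prefixes),
--     )
-- ===== Notes on version B (the rewrite author's own statement) =====
-- stated objective: idiomatic
-- what changed: Replaced the two-accumulator partition loop with a single stable sort on a boolean match key; no prioritized/others lists are maintained.
import Mathlib
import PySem

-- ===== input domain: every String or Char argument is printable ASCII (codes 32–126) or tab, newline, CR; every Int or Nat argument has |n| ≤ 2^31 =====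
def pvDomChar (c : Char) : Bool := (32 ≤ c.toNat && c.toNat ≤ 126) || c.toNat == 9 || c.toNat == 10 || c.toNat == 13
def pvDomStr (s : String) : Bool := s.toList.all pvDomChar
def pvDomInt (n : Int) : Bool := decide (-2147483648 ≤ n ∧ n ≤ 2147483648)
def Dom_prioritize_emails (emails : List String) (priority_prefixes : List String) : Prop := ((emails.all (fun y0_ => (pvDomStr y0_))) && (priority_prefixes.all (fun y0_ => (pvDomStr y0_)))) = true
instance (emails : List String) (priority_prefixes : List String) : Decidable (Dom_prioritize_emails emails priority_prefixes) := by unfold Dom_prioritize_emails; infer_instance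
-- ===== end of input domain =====

-- B replaces A's two-accumulator partition loop with one stable sort on a boolean match key (idiomatic; same result).


-- ===== PORT A =====
-- email.split('@')[0].lower(): '@' is a non-empty separator so split? is some, and the
-- split list is always non-empty, so [0] is its head (headD "" is exact here).
def prioritize_emails (emails : List String) (priority_prefixes : List String) : List String :=
  let res := emails.foldl
    (fun (acc : List String × List String) email =>
      let local_part := PySem.Str.lower (((PySem.Str.split? email "@").getD []).headD "")
      if priority_prefixes.any (fun prefix_ => PySem.Str.startswith local_part prefix_) then
        (acc.1 ++ [email], acc.2)
      else
        (acc.1, acc.2 ++ [email]))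
    ([], [])
  res.1 ++ res.2

-- ===== PORT B =====
-- Python's bool sort key (False < True) is ported as Nat 0/1, exactly the same ordering.
def prioritize_emails_alt (emails : List String) (priority_prefixes : List String) : List String :=
  PySem.List.sorted emails
    (fun e =>
      if priority_prefixes.any (fun p =>
          PySem.Str.startswith (PySem.Str.lower (((PySem.Str.split? e "@").getD []).headD "")) p) then
        (0 : Nat)
      else 1)

-- ===== PRECONDITION & SPEC =====
def Spec_prioritize_emails (emails : List String) (priority_prefixes : List String) (out : List String) : Prop := out = prioritize_emails_alt emails priority_prefixes
instance (emails : List String) (priority_prefixes : List String) (out : List String) : Decidable (Spec_prioritize_emails emails priority_prefixes out) := by unfold Spec_prioritize_emails; infer_instance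

-- ===== CLAIM (what is proved, stated in full; the proofs are below) =====
def Claim_equal_prioritize_emails : Prop := ∀ (emails : List String) (priority_prefixes : List String), Dom_prioritize_emails emails priority_prefixes → Spec_prioritize_emails emails priority_prefixes (prioritize_emails emails priority_prefixes)

-- ===== LEMMAS AND PROOFS =====

-- insertBy puts x right between a block it never precedes and a block it always precedes
theorem insertBy_mid {α : Type} (before : α → α → Bool) (x : α) (as bs : List α)
    (ha : ∀ a ∈ as, before x a = false) (hb : ∀ b ∈ bs, before x b = true) :
    PySem.List.insertBy before x (as ++ bs) = as ++ x :: bs := by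
  induction as with
  | nil =>
    cases bs with
    | nil => rfl
    | cons b bs' => simp [PySem.List.insertBy, hb b (by simp)]
  | cons a as' ih =>
    simp only [List.cons_append, PySem.List.insertBy, ha a (by simp)]
    simp only [Bool.false_eq_true, if_false]
    exact congrArg (a :: ·) (ih (fun y hy => ha y (by simp [hy])) )

-- A stable sort on a 0/1-valued key is exactly the stable partition
theorem sorted_binary_key {α : Type} (p : α → Bool) (xs : List α) :
    PySem.List.sorted xs (fun e => if p e then (0 : Nat) else 1) =
      xs.filter p ++ xs.filter (fun e => !p e) := by
  rw [PySem.List.sorted_eq_foldl_insertBy]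
  induction xs using List.reverseRecOn with
  | nil => rfl
  | append_singleton xs x ih =>
    rw [List.foldl_concat, ih, List.filter_append, List.filter_append]
    by_cases hx : p x
    · rw [insertBy_mid]
      · simp [hx]
      · intro a ha
        simp only [List.mem_filter] at ha
        simp [hx, ha.2]
      · intro b hb
        simp only [List.mem_filter, Bool.not_eq_eq_eq_not, Bool.not_true] at hb
        simp [hx, hb.2]
    · rw [PySem.List.insertBy_of_forall_not_before]
      · simp [hx]
      · intro y hy
        by_cases hy2 : p y <;> simp [hx, hy2]

-- A's partition loop with arbitrary starting accumulators, characterised by filters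
theorem foldl_partition {α : Type} (p : α → Bool) (xs : List α) (p0 o0 : List α) :
    xs.foldl
      (fun (acc : List α × List α) x =>
        if p x then (acc.1 ++ [x], acc.2) else (acc.1, acc.2 ++ [x]))
      (p0, o0) =
      (p0 ++ xs.filter p, o0 ++ xs.filter (fun e => !p e)) := by
  induction xs generalizing p0 o0 with
  | nil => simp
  | cons x xs ih =>
    by_cases hx : p x
    · simp [hx, ih]
    · simp [hx, ih]

-- ===== VERDICT (by name: the statement is the Claim_ definition above) =====
theorem prioritize_emails_spec : Claim_equal_prioritize_emails := by
  intro emails priority_prefixes _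
  show prioritize_emails emails priority_prefixes = prioritize_emails_alt emails priority_prefixes
  unfold prioritize_emails prioritize_emails_alt
  rw [sorted_binary_key
      (fun e => priority_prefixes.any (fun p =>
        PySem.Str.startswith (PySem.Str.lower (((PySem.Str.split? e "@").getD []).headD "")) p))]
  rw [foldl_partition
      (fun e => priority_prefixes.any (fun p =>
        PySem.Str.startswith (PySem.Str.lower (((PySem.Str.split? e "@").getD []).headD "")) p))]
  simp
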